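-- pv_equiv track=rewrite | github.com/rasterroo/MetaPrep | CoderPad Practice.py | max_classes_in_consecutive_years
-- ===== SOURCE A (Python) =====
-- def max_classes_in_consecutive_years(workshops):
--     d = {}
--     for year in workshops:
--         d[year] = d.get(year,0) + 1
--     d = sorted(d.items(), key=lambda x:x[0])
--
--     curr = max_classes = 0
--     for i in range(len(d)):
--         if i!=0 and d[i][0] != d[i-1][0] + 1: # reset
--             curr = 0
--         curr += d[i][1]
--         max_classes = max(max_classes, curr)
--
--     return max_classes
-- ===== SOURCE B (Python) =====
-- def max_classes_in_consecutive_years(workshops):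
--     counts = {}
--     for year in workshops:
--         counts[year] = counts.get(year, 0) + 1
--     best = 0
--     for y in counts:
--         if y - 1 not in counts:  # y starts a run of consecutive years
--             total = 0
--             z = y
--             while z in counts:
--                 total += counts[z]
--                 z += 1
--             best = max(best, total)
--     return best
-- ===== Notes on version B (the rewrite author's own statement) =====
-- stated objective: alternative
-- what changed: B drops the sort entirely: it hash-counts the years, then for each run-start year (a year whose predecessor is absent from the table) walks forward through consecutive years summing counts, taking the maximum run total.
import Mathlib
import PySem

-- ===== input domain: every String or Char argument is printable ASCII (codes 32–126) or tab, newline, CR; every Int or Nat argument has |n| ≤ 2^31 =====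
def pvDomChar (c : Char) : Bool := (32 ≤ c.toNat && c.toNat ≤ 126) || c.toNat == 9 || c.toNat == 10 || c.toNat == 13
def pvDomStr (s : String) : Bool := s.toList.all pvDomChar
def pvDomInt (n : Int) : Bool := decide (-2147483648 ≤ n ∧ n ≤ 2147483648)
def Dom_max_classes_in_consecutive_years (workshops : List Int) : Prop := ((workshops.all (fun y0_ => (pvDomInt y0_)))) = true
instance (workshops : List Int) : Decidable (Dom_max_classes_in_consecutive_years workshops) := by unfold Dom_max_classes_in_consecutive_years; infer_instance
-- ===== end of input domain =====

-- B replaces A's sort-and-scan by a hash-count plus a forward walk from each run-start year (objective: alternative, sort-free algorithm).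

-- ===== PORT A =====
def max_classes_in_consecutive_years (workshops : List Int) : Int :=
  let d0 := workshops.foldl (fun d year => d.insert year (d.getD year 0 + 1)) (PySem.Dict.empty)
  let d := PySem.List.sorted d0.items (fun x => x.1)
  let st := (PySem.List.pyRange 0 (d.length : Int) 1).foldl
    (fun (st : Int × Int) i =>
      let curr := if i ≠ 0 ∧ (PySem.List.pyGetD d i (0, 0)).1 ≠ (PySem.List.pyGetD d (i - 1) (0, 0)).1 + 1
                  then 0 else st.1
      let curr := curr + (PySem.List.pyGetD d i (0, 0)).2
      (curr, max st.2 curr)) (0, 0)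
  st.2

-- ===== PORT B =====
-- the 'while z in counts' walk; fuel = number of distinct years bounds the run length (termination only)
def pvWalk (counts : PySem.Dict Int Int) : Nat → Int → Int → Int
  | 0, _, total => total
  | fuel + 1, z, total =>
    if counts.contains z then pvWalk counts fuel (z + 1) (total + counts.getD z 0) else total

def max_classes_in_consecutive_years_alt (workshops : List Int) : Int :=
  let counts := workshops.foldl (fun d year => d.insert year (d.getD year 0 + 1)) (PySem.Dict.empty)
  counts.keys.foldl (fun best y =>
    if counts.contains (y - 1) then best
    else
      let total := pvWalk counts counts.size y 0
      max best total) 0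

-- ===== PRECONDITION & SPEC =====
def Spec_max_classes_in_consecutive_years (workshops : List Int) (out : Int) : Prop := out = max_classes_in_consecutive_years_alt workshops
instance (workshops : List Int) (out : Int) : Decidable (Spec_max_classes_in_consecutive_years workshops out) := by unfold Spec_max_classes_in_consecutive_years; infer_instance

-- ===== CLAIM (what is proved, stated in full; the proofs are below) =====
def Claim_equal_max_classes_in_consecutive_years : Prop := ∀ (workshops : List Int), Dom_max_classes_in_consecutive_years workshops → Spec_max_classes_in_consecutive_years workshops (max_classes_in_consecutive_years workshops)

-- ===== LEMMAS AND PROOFS =====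

-- abstract walk: pvWalk on (counter ws), expressed over the raw list ws
def awalk (ws : List Int) : Nat → Int → Int → Int
  | 0, _, t => t
  | f + 1, z, t => if z ∈ ws then awalk ws f (z + 1) (t + (ws.count z : Int)) else t

-- run sum from year z (fuel = number of distinct elements, always adequate)
def W (ws : List Int) (z : Int) : Int := awalk ws (PySem.Set.ofList ws).length z 0

-- A's scan as a structural fold carrying (previous year?, curr, max)
def aStepP (st : Option Int × Int × Int) (p : Int × Int) : Option Int × Int × Int :=
  let curr := (if st.1.any (fun q => decide (p.1 ≠ q + 1)) then 0 else st.2.1) + p.2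
  ((some p.1 : Option Int), curr, max st.2.2 curr)

theorem pvWalk_counter (ws : List Int) : ∀ (f : Nat) (z t : Int),
    pvWalk (PySem.Dict.counter ws) f z t = awalk ws f z t := by
  intro f
  induction f with
  | zero => intro z t; rfl
  | succ f ih =>
    intro z t
    simp only [pvWalk, awalk, PySem.Dict.contains_counter, PySem.Dict.getD_counter]
    by_cases h : z ∈ ws
    · simp [h, ih]
    · simp [h]

theorem filter_succ_le_eq_lt (L : List Int) (z : Int) :
    L.filter (fun w => decide (z + 1 ≤ w)) = L.filter (fun w => decide (z < w)) := by
  apply List.filter_congr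
  intro a _
  simp only [decide_eq_decide]
  omega

theorem filter_ge_mono (L : List Int) (z : Int) :
    (L.filter (fun w => decide (z < w))).length ≤ (L.filter (fun w => decide (z ≤ w))).length := by
  induction L with
  | nil => simp
  | cons a L ih =>
    simp only [List.filter_cons]
    by_cases h1 : z < a
    · have h2 : z ≤ a := by omega
      simp [h1, h2]; omega
    · by_cases h2 : z ≤ a <;> simp [h1, h2] <;> omega

theorem filter_ge_succ_lt (L : List Int) (z : Int) (hnd : L.Nodup) (hz : z ∈ L) :
    (L.filter (fun w => decide (z < w))).length < (L.filter (fun w => decide (z ≤ w))).length := by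
  induction L with
  | nil => simp at hz
  | cons a L ih =>
    rcases List.nodup_cons.mp hnd with ⟨ha, hnd'⟩
    simp only [List.filter_cons]
    rcases List.mem_cons.mp hz with rfl | hzL
    · simp only [decide_eq_true_eq, lt_self_iff_false, if_false, le_refl, if_true,
        List.length_cons]
      have := filter_ge_mono L z
      omega
    · have h := ih hnd' hzL
      by_cases h1 : z < a
      · have h2 : z ≤ a := by omega
        simp [h1, h2]; omega
      · by_cases h2 : z ≤ a <;> simp [h1, h2] <;> omega

theorem mem_filter_ge_pos (ws : List Int) (z : Int) (h : z ∈ ws) :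
    0 < ((PySem.Set.ofList ws).filter (fun w => decide (z ≤ w))).length := by
  have hz : z ∈ (PySem.Set.ofList ws).filter (fun w => decide (z ≤ w)) := by
    simp [List.mem_filter, PySem.Set.mem_ofList, h]
  exact List.length_pos_of_mem hz

theorem filter_ge_succ_lt' (ws : List Int) (z : Int) (h : z ∈ ws) :
    ((PySem.Set.ofList ws).filter (fun w => decide (z < w))).length
      < ((PySem.Set.ofList ws).filter (fun w => decide (z ≤ w))).length :=
  filter_ge_succ_lt _ _ (PySem.Set.nodup_ofList ws) ((PySem.Set.mem_ofList ws z).mpr h)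

theorem awalk_irrel (ws : List Int) : ∀ (f g : Nat) (z t : Int),
    ((PySem.Set.ofList ws).filter (fun w => decide (z ≤ w))).length ≤ f →
    ((PySem.Set.ofList ws).filter (fun w => decide (z ≤ w))).length ≤ g →
    awalk ws f z t = awalk ws g z t := by
  intro f
  induction f with
  | zero =>
    intro g z t hf hg
    have hz : z ∉ ws := by
      intro h
      have := mem_filter_ge_pos ws z h
      omega
    cases g with
    | zero => rfl
    | succ g => simp [awalk, hz]
  | succ f ih =>
    intro g z t hf hg
    by_cases h : z ∈ ws
    · have hlt := filter_ge_succ_lt' ws z h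
      cases g with
      | zero =>
        have := mem_filter_ge_pos ws z h
        omega
      | succ g =>
        simp only [awalk, h, if_pos]
        exact ih g (z + 1) _ (by rw [filter_succ_le_eq_lt]; omega) (by rw [filter_succ_le_eq_lt]; omega)
    · cases g with
      | zero => simp [awalk, h]
      | succ g => simp [awalk, h]

theorem awalk_add (ws : List Int) : ∀ (f : Nat) (z t : Int),
    awalk ws f z t = t + awalk ws f z 0 := by
  intro f
  induction f with
  | zero => intro z t; simp [awalk]
  | succ f ih =>
    intro z t
    simp only [awalk]
    by_cases h : z ∈ ws
    · simp only [h, if_pos]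
      rw [ih (z + 1) (t + _), ih (z + 1) (0 + _)]
      ring
    · simp [h]

theorem awalk_nonneg (ws : List Int) : ∀ (f : Nat) (z : Int), 0 ≤ awalk ws f z 0 := by
  intro f
  induction f with
  | zero => intro z; simp [awalk]
  | succ f ih =>
    intro z
    simp only [awalk]
    by_cases h : z ∈ ws
    · simp only [h, if_pos]
      rw [awalk_add]
      have := ih (z + 1)
      have : (0 : Int) ≤ (ws.count z : Int) := by positivity
      omega
    · simp [h]

theorem W_nonneg (ws : List Int) (z : Int) : 0 ≤ W ws z := awalk_nonneg ws _ z

theorem W_rec (ws : List Int) (z : Int) (hz : z ∈ ws) :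
    W ws z = (ws.count z : Int) + W ws (z + 1) := by
  unfold W
  have hpos := mem_filter_ge_pos ws z hz
  have hlt := filter_ge_succ_lt' ws z hz
  have hle : ((PySem.Set.ofList ws).filter (fun w => decide (z ≤ w))).length
      ≤ (PySem.Set.ofList ws).length := List.filter_sublist.length_le
  obtain ⟨F, hF⟩ : ∃ F, (PySem.Set.ofList ws).length = F + 1 :=
    ⟨(PySem.Set.ofList ws).length - 1, by omega⟩
  rw [hF]
  rw [show awalk ws (F + 1) z 0
      = if z ∈ ws then awalk ws F (z + 1) (0 + (ws.count z : Int)) else 0 from rfl]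
  rw [if_pos hz]
  rw [awalk_add ws F (z + 1) (0 + (ws.count z : Int))]
  have heq : awalk ws F (z + 1) 0 = awalk ws (F + 1) (z + 1) 0 :=
    awalk_irrel ws F (F + 1) (z + 1) 0 (by rw [filter_succ_le_eq_lt]; omega)
      (by rw [filter_succ_le_eq_lt]; omega)
  omega

theorem W_zero (ws : List Int) (z : Int) (hz : z ∉ ws) : W ws z = 0 := by
  unfold W
  cases h : (PySem.Set.ofList ws).length with
  | zero => rfl
  | succ F => simp [awalk, hz]

-- the heart: A's gap-reset scan over the sorted distinct years equals B's run-start fold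
theorem main_scan (ws : List Int) : ∀ (todo done : List Int),
    (done ++ todo).Pairwise (· < ·) →
    (∀ z, z ∈ done ++ todo ↔ z ∈ ws) →
    ∀ (prev? : Option Int) (curr mx best : Int),
    (match prev? with | none => done = [] | some p => done.getLast? = some p) →
    (prev? = none → curr = 0) →
    (match todo, prev? with
      | [], _ => best = mx
      | y :: _, some p => if y = p + 1 then best = max mx (curr + W ws y) else best = mx
      | _ :: _, none => best = mx) →
    ((todo.map (fun k => (k, (ws.count k : Int)))).foldl aStepP (prev?, curr, mx)).2.2
      = todo.foldl (fun best y => if (y - 1) ∈ ws then best else max best (W ws y)) best := by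
  intro todo
  induction todo with
  | nil =>
    intro done hpw hmem prev? curr mx best hprev hcurr hbest
    simpa using hbest.symm
  | cons y t ih =>
    intro done hpw hmem prev? curr mx best hprev hcurr hbest
    rcases List.pairwise_append.mp hpw with ⟨hpwd, hpwt, hcross⟩
    rcases List.pairwise_cons.mp hpwt with ⟨hyt, hpwt'⟩
    have hymem : y ∈ ws := (hmem y).mp (by simp)
    have hnext : y + 1 ∉ t → y + 1 ∉ ws := by
      intro hyp h
      rcases List.mem_append.mp ((hmem (y + 1)).mpr h) with hd | ht
      · have := hcross _ hd y (by simp); omega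
      · rcases List.mem_cons.mp ht with h1 | h2
        · omega
        · exact hyp h2
    have hWy := W_rec ws y hymem
    have h0 := W_nonneg ws (y + 1)
    have hWn : y + 1 ∉ t → W ws y = (ws.count y : Int) := by
      intro h
      rw [hWy, W_zero ws (y + 1) (hnext h)]
      ring
    cases prev? with
    | none =>
      have hdone : done = [] := hprev
      subst hdone
      have hcurr0 : curr = 0 := hcurr rfl
      subst hcurr0
      have hbest' : best = mx := hbest
      have hy1 : y - 1 ∉ ws := by
        intro h
        rcases List.mem_append.mp ((hmem (y - 1)).mpr h) with hd | ht
        · simp at hd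
        · rcases List.mem_cons.mp ht with h1 | h2
          · omega
          · have := hyt _ h2; omega
      simp only [List.map_cons, List.foldl_cons]
      rw [show aStepP (none, 0, mx) (y, (ws.count y : Int))
          = ((some y : Option Int), 0 + (ws.count y : Int), max mx (0 + (ws.count y : Int)))
          from by simp [aStepP]]
      rw [if_neg hy1]
      refine ih ([] ++ [y]) (by simpa using hpwt) (fun z => by simpa using hmem z) (some y)
        (0 + (ws.count y : Int)) (max mx (0 + (ws.count y : Int))) (max best (W ws y))
        (by simp) (by intro h; cases h) ?_
      cases t with
      | nil =>
        show max best (W ws y) = max mx (0 + (ws.count y : Int))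
        have hz := hWn (by simp)
        rw [hbest', hz]
        omega
      | cons y' t' =>
        rcases List.pairwise_cons.mp hpwt' with ⟨hy't', _⟩
        have hyy' : y < y' := hyt y' (by simp)
        show if y' = y + 1
          then max best (W ws y) = max (max mx (0 + (ws.count y : Int))) (0 + (ws.count y : Int) + W ws y')
          else max best (W ws y) = max mx (0 + (ws.count y : Int))
        by_cases hc : y' = y + 1
        · rw [if_pos hc, hc, hbest']
          omega
        · have hz : W ws y = (ws.count y : Int) := hWn (by
            intro hmemT
            rcases List.mem_cons.mp hmemT with h1 | h2
            · omega
            · have := hy't' _ h2; omega)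
          rw [if_neg hc, hbest', hz]
          omega
    | some p =>
      obtain ⟨done', rfl⟩ := List.getLast?_eq_some_iff.mp hprev
      have hdp : ∀ a ∈ done', a < p := by
        intro a ha
        rcases List.pairwise_append.mp hpwd with ⟨_, _, hc⟩
        exact hc a ha p (by simp)
      have hpy : p < y := hcross p (by simp) y (by simp)
      have hbest2 : (if y = p + 1 then best = max mx (curr + W ws y) else best = mx) := hbest
      by_cases hcont : y = p + 1
      · -- run continues
        have hy1mem : y - 1 ∈ ws := by
          apply (hmem (y - 1)).mp
          rw [show y - 1 = p from by omega]
          simp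
        rw [if_pos hcont] at hbest2
        simp only [List.map_cons, List.foldl_cons]
        rw [show aStepP (some p, curr, mx) (y, (ws.count y : Int))
            = ((some y : Option Int), curr + (ws.count y : Int), max mx (curr + (ws.count y : Int)))
            from by simp [aStepP, hcont]]
        rw [if_pos hy1mem]
        refine ih ((done' ++ [p]) ++ [y]) (by rw [List.append_assoc]; exact hpw)
          (fun z => by rw [List.append_assoc]; exact hmem z) (some y)
          (curr + (ws.count y : Int)) (max mx (curr + (ws.count y : Int))) best
          List.getLast?_concat (by intro h; cases h) ?_
        cases t with
        | nil =>
          show best = max mx (curr + (ws.count y : Int))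
          have hz := hWn (by simp)
          rw [hbest2, hz]
        | cons y' t' =>
          rcases List.pairwise_cons.mp hpwt' with ⟨hy't', _⟩
          have hyy' : y < y' := hyt y' (by simp)
          show if y' = y + 1
            then best = max (max mx (curr + (ws.count y : Int))) (curr + (ws.count y : Int) + W ws y')
            else best = max mx (curr + (ws.count y : Int))
          by_cases hc : y' = y + 1
          · rw [if_pos hc, hc, hbest2]
            omega
          · have hz : W ws y = (ws.count y : Int) := hWn (by
              intro hmemT
              rcases List.mem_cons.mp hmemT with h1 | h2
              · omega
              · have := hy't' _ h2; omega)
            rw [if_neg hc, hbest2, hz]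
      · -- gap: run restarts at y
        rw [if_neg hcont] at hbest2
        have hy1 : y - 1 ∉ ws := by
          intro h
          rcases List.mem_append.mp ((hmem (y - 1)).mpr h) with hd | ht
          · rcases List.mem_append.mp hd with h1 | h2
            · have := hdp _ h1; omega
            · simp at h2; omega
          · rcases List.mem_cons.mp ht with h1 | h2
            · omega
            · have := hyt _ h2; omega
        simp only [List.map_cons, List.foldl_cons]
        rw [show aStepP (some p, curr, mx) (y, (ws.count y : Int))
            = ((some y : Option Int), 0 + (ws.count y : Int), max mx (0 + (ws.count y : Int)))
            from by simp [aStepP, hcont]]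
        rw [if_neg hy1]
        refine ih ((done' ++ [p]) ++ [y]) (by rw [List.append_assoc]; exact hpw)
          (fun z => by rw [List.append_assoc]; exact hmem z) (some y)
          (0 + (ws.count y : Int)) (max mx (0 + (ws.count y : Int))) (max best (W ws y))
          List.getLast?_concat (by intro h; cases h) ?_
        cases t with
        | nil =>
          show max best (W ws y) = max mx (0 + (ws.count y : Int))
          have hz := hWn (by simp)
          rw [hbest2, hz]
          omega
        | cons y' t' =>
          rcases List.pairwise_cons.mp hpwt' with ⟨hy't', _⟩
          have hyy' : y < y' := hyt y' (by simp)
          show if y' = y + 1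
            then max best (W ws y) = max (max mx (0 + (ws.count y : Int))) (0 + (ws.count y : Int) + W ws y')
            else max best (W ws y) = max mx (0 + (ws.count y : Int))
          by_cases hc : y' = y + 1
          · rw [if_pos hc, hc, hbest2]
            omega
          · have hz : W ws y = (ws.count y : Int) := hWn (by
              intro hmemT
              rcases List.mem_cons.mp hmemT with h1 | h2
              · omega
              · have := hy't' _ h2; omega)
            rw [if_neg hc, hbest2, hz]
            omega

-- A's per-index loop body, named (defeq to the lambda in the port)
def stepIdx (L : List (Int × Int)) (st : Int × Int) (i : Int) : Int × Int :=
  let curr := if i ≠ 0 ∧ (PySem.List.pyGetD L i (0, 0)).1 ≠ (PySem.List.pyGetD L (i - 1) (0, 0)).1 + 1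
              then 0 else st.1
  let curr := curr + (PySem.List.pyGetD L i (0, 0)).2
  (curr, max st.2 curr)

theorem aStepP_fst (M : List (Int × Int)) (o : Option Int) (c m : Int) :
    (M.foldl aStepP (o, c, m)).1
      = match M.getLast? with | none => o | some q => some q.1 := by
  induction M using List.reverseRecOn generalizing o c m with
  | nil => rfl
  | append_singleton M p ih =>
    rw [List.foldl_append]
    simp [aStepP]

theorem pyGetD_append_left (M : List (Int × Int)) (p : Int × Int) (j : Int)
    (hj0 : 0 ≤ j) (hj1 : j < (M.length : Int)) :
    PySem.List.pyGetD (M ++ [p]) j (0, 0) = PySem.List.pyGetD M j (0, 0) := by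
  rw [PySem.List.pyGetD_eq_getElem _ _ hj0 (by simp; omega),
      PySem.List.pyGetD_eq_getElem _ _ hj0 (by simpa using hj1)]
  exact List.getElem_append_left (by omega)

theorem idxfold_aux (L : List (Int × Int)) :
    (PySem.List.pyRange 0 (L.length : Int) 1).foldl (stepIdx L) (0, 0)
    = ((L.foldl aStepP ((none : Option Int), 0, 0)).2.1,
       (L.foldl aStepP ((none : Option Int), 0, 0)).2.2) := by
  induction L using List.reverseRecOn with
  | nil =>
    rw [show ((([] : List (Int × Int)).length : Int)) = 0 by simp,
        PySem.List.pyRange_one_eq_nil le_rfl]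
    rfl
  | append_singleton M p ih =>
    have hlen : (((M ++ [p]).length : Nat) : Int) = (M.length : Int) + 1 := by
      simp
    rw [hlen, PySem.List.pyRange_one_succ_right (by positivity), List.foldl_append,
        List.foldl_append]
    simp only [List.foldl_cons, List.foldl_nil]
    have hcong : (PySem.List.pyRange 0 (M.length : Int) 1).foldl (stepIdx (M ++ [p])) (0, 0)
        = (PySem.List.pyRange 0 (M.length : Int) 1).foldl (stepIdx M) (0, 0) := by
      apply PySem.List.foldl_congr_mem
      intro acc i hi
      rcases PySem.List.mem_pyRange_one.mp hi with ⟨h0, h1⟩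
      by_cases hi0 : i = 0
      · subst hi0
        simp [stepIdx, pyGetD_append_left M p 0 le_rfl (by omega)]
      · simp only [stepIdx, pyGetD_append_left M p i h0 (by omega),
          pyGetD_append_left M p (i - 1) (by omega) (by omega)]
    rw [hcong, ih]
    have hlast : PySem.List.pyGetD (M ++ [p]) ((M.length : Nat) : Int) (0, 0) = p := by
      rw [PySem.List.pyGetD_eq_getElem _ _ (by positivity) (by simp)]
      simp
    cases hL : M.getLast? with
    | none =>
      have hM : M = [] := List.getLast?_eq_none_iff.mp hL
      subst hM
      simp [stepIdx, aStepP, PySem.List.pyGetD_zero_cons]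
    | some q =>
      have hprevv : PySem.List.pyGetD (M ++ [p]) (((M.length : Nat) : Int) - 1) (0, 0) = q := by
        obtain ⟨M', rfl⟩ := List.getLast?_eq_some_iff.mp hL
        have h1 : (((M' ++ [q]).length : Nat) : Int) - 1 = ((M'.length : Nat) : Int) := by simp
        rw [h1, PySem.List.pyGetD_eq_getElem _ _ (by positivity) (by simp)]
        rw [List.getElem_append_left (by simp)]
        simp
      have hq : (M.foldl aStepP ((none : Option Int), 0, 0)).1 = some q.1 := by
        rw [aStepP_fst, hL]
      have hne : ((M.length : Nat) : Int) ≠ 0 := by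
        have hM : M ≠ [] := by
          intro h
          subst h
          simp at hL
        have := List.length_pos_of_ne_nil hM
        omega
      simp only [stepIdx, aStepP, hq, Option.any_some]
      rw [hlast, hprevv]
      split_ifs with h1 h2 h2'
      · rfl
      · exfalso
        rcases h1 with ⟨-, hb⟩
        simp at h2
        exact hb h2
      · exfalso
        apply h1
        refine ⟨hne, ?_⟩
        simpa using h2'
      · rfl

-- bridge: A's index loop over pyRange = the structural fold aStepP
theorem idxfold (L : List (Int × Int)) :
    ((PySem.List.pyRange 0 (L.length : Int) 1).foldl
      (fun (st : Int × Int) i =>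
        let curr := if i ≠ 0 ∧ (PySem.List.pyGetD L i (0, 0)).1 ≠ (PySem.List.pyGetD L (i - 1) (0, 0)).1 + 1
                    then 0 else st.1
        let curr := curr + (PySem.List.pyGetD L i (0, 0)).2
        (curr, max st.2 curr)) (0, 0)).2
    = ((L.foldl aStepP ((none : Option Int), 0, 0)).2.2) := by
  have h : (PySem.List.pyRange 0 (L.length : Int) 1).foldl
      (fun (st : Int × Int) i =>
        let curr := if i ≠ 0 ∧ (PySem.List.pyGetD L i (0, 0)).1 ≠ (PySem.List.pyGetD L (i - 1) (0, 0)).1 + 1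
                    then 0 else st.1
        let curr := curr + (PySem.List.pyGetD L i (0, 0)).2
        (curr, max st.2 curr)) (0, 0)
      = (PySem.List.pyRange 0 (L.length : Int) 1).foldl (stepIdx L) (0, 0) := rfl
  rw [h, idxfold_aux]

-- ===== VERDICT (by name: the statement is the Claim_ definition above) =====
theorem max_classes_in_consecutive_years_spec : Claim_equal_max_classes_in_consecutive_years := by
  intro ws _hdom
  unfold Spec_max_classes_in_consecutive_years
  simp only [max_classes_in_consecutive_years, max_classes_in_consecutive_years_alt]
  rw [PySem.Dict.foldl_insert_getD_add_one_eq_counter]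
  -- name the sorted distinct-year list
  have hd : PySem.List.sorted (PySem.Dict.counter ws).items (fun x => x.1)
      = (PySem.List.sorted (PySem.Set.ofList ws) (fun x => x)).map
          (fun k => (k, (ws.count k : Int))) := by
    apply PySem.List.sorted_eq_of_perm_of_pairwise_lt
    · rw [PySem.Dict.items_counter]
      exact (PySem.List.sorted_perm _ _ _).map _
    · rw [List.pairwise_map]
      simpa using PySem.List.sorted_ofList_pairwise_lt ws
  rw [hd, idxfold]
  -- A side: structural scan over the sorted years = the run-start fold over them
  have hpw' : (([] : List Int) ++ PySem.List.sorted (PySem.Set.ofList ws) (fun x => x)).Pairwise (· < ·) := by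
    simpa using PySem.List.sorted_ofList_pairwise_lt ws
  have hmem' : ∀ z, z ∈ ([] : List Int) ++ PySem.List.sorted (PySem.Set.ofList ws) (fun x => x) ↔ z ∈ ws := by
    intro z
    simp [PySem.List.mem_sorted, PySem.Set.mem_ofList]
  rw [main_scan ws (PySem.List.sorted (PySem.Set.ofList ws) (fun x => x)) [] hpw' hmem'
      none 0 0 0 rfl (fun _ => rfl)
      (by rcases PySem.List.sorted (PySem.Set.ofList ws) (fun x => x) with _ | ⟨y, t⟩ <;> rfl)]
  -- B side: the dict operations reduce to list operations on ws
  rw [PySem.Dict.keys_counter]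
  have hstep : ∀ (best y : Int),
      (if (PySem.Dict.counter ws).contains (y - 1) = true then best
       else
         let total := pvWalk (PySem.Dict.counter ws) (PySem.Dict.counter ws).size y 0
         max best total)
      = (if (y - 1) ∈ ws then best else max best (W ws y)) := by
    intro best y
    have hsz : (PySem.Dict.counter ws).size = (PySem.Set.ofList ws).length := by
      show (PySem.Dict.counter ws).items.length = _
      rw [PySem.Dict.items_counter]
      exact List.length_map _
    simp only [pvWalk_counter, hsz, PySem.Dict.contains_counter]
    by_cases h : (y - 1) ∈ ws
    · rw [if_pos (List.contains_iff_mem.mpr h), if_pos h]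
    · rw [if_neg (fun hc => h (List.contains_iff_mem.mp hc)), if_neg h]
      rfl
  rw [PySem.List.foldl_congr_mem (PySem.Set.ofList ws) _
      (fun best y => if (y - 1) ∈ ws then best else max best (W ws y)) 0
      (fun acc x _ => hstep acc x)]
  -- finally: the fold of the commutative run-start step is permutation invariant
  exact (@List.Perm.foldl_eq _ _
      (fun best y => if (y - 1) ∈ ws then best else max best (W ws y)) _ _
      ⟨by
        intro b x y
        split_ifs <;> omega⟩
      (PySem.List.sorted_perm _ _ _).symm 0).symm
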